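-- pv_equiv track=rewrite | github.com/EpiWave/EpiWave | epiwave_multiclass_model_tuned.py | get_window_label
-- ===== SOURCE A (Python) =====
-- PREICTAL_SECONDS = 120
--
-- def get_window_label(start_sec, end_sec, seizure_intervals):
--     # First priority: actual seizure
--     for seizure_start, seizure_end in seizure_intervals:
--         if start_sec < seizure_end and end_sec > seizure_start:
--             return "seizure"
--
--     # Second priority: preictal period before seizure
--     for seizure_start, _ in seizure_intervals:
--         preictal_start = max(0, seizure_start - PREICTAL_SECONDS)
--         preictal_end = seizure_start
--
--         if start_sec < preictal_end and end_sec > preictal_start: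
--             return "preictal"
--
--     return "normal"
-- ===== SOURCE B (Python) =====
-- PREICTAL_SECONDS = 120
--
-- def get_window_label(start_sec, end_sec, seizure_intervals):
--     # Single pass: seizure overlap returns immediately (keeps priority);
--     # preictal overlap only sets a flag, resolved after the scan.
--     found_preictal = False
--     for seizure_start, seizure_end in seizure_intervals:
--         if start_sec < seizure_end and end_sec > seizure_start:
--             return "seizure"
--         preictal_start = max(0, seizure_start - PREICTAL_SECONDS)
--         if start_sec < seizure_start and end_sec > preictal_start:
--             found_preictal = True
--     return "preictal" if found_preictal else "normal"
-- ===== Notes on version B (the rewrite author's own statement) =====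
-- stated objective: alternative
-- what changed: Replaced A's two sequential scans over seizure_intervals with a single pass that returns 'seizure' immediately on overlap and otherwise accumulates a found_preictal flag, resolved after the loop.
import Mathlib
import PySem

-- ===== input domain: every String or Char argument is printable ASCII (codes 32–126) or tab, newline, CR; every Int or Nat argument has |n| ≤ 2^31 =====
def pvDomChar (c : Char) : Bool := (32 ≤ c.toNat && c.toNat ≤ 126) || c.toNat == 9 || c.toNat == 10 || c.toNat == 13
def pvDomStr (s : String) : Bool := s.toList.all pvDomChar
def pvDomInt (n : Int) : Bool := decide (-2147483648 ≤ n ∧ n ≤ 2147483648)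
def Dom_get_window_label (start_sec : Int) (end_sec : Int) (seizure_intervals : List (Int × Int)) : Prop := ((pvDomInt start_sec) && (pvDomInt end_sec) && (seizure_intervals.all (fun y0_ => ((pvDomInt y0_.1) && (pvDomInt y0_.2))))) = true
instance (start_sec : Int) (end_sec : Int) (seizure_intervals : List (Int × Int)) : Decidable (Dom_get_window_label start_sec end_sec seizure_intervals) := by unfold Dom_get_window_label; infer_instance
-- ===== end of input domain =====

-- B fuses A's two sequential scans into one pass with a found_preictal flag (alternative decomposition, same cost).

-- ===== PORT A =====
-- first loop of A: early return "seizure" on overlap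
def aSeizureLoop (start_sec end_sec : Int) : List (Int × Int) → Bool
  | [] => false
  | (ss, se) :: t =>
    if start_sec < se && end_sec > ss then true else aSeizureLoop start_sec end_sec t

-- second loop of A: early return "preictal" on preictal-window overlap
def aPreictalLoop (start_sec end_sec : Int) : List (Int × Int) → Bool
  | [] => false
  | (ss, _) :: t =>
    if start_sec < ss && end_sec > max 0 (ss - 120) then true
    else aPreictalLoop start_sec end_sec t

def get_window_label (start_sec : Int) (end_sec : Int) (seizure_intervals : List (Int × Int)) : String :=
  if aSeizureLoop start_sec end_sec seizure_intervals then "seizure"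
  else if aPreictalLoop start_sec end_sec seizure_intervals then "preictal"
  else "normal"

-- ===== PORT B =====
-- single pass: immediate "seizure" on overlap, otherwise carry a found_preictal flag
def bLoop (start_sec end_sec : Int) (found : Bool) : List (Int × Int) → String
  | [] => if found then "preictal" else "normal"
  | (ss, se) :: t =>
    if start_sec < se && end_sec > ss then "seizure"
    else bLoop start_sec end_sec (found || (start_sec < ss && end_sec > max 0 (ss - 120))) t

def get_window_label_alt (start_sec : Int) (end_sec : Int) (seizure_intervals : List (Int × Int)) : String :=
  bLoop start_sec end_sec false seizure_intervals

-- ===== PRECONDITION & SPEC =====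
def Spec_get_window_label (start_sec : Int) (end_sec : Int) (seizure_intervals : List (Int × Int)) (out : String) : Prop := out = get_window_label_alt start_sec end_sec seizure_intervals
instance (start_sec : Int) (end_sec : Int) (seizure_intervals : List (Int × Int)) (out : String) : Decidable (Spec_get_window_label start_sec end_sec seizure_intervals out) := by unfold Spec_get_window_label; infer_instance

-- ===== CLAIM (what is proved, stated in full; the proofs are below) =====
def Claim_equal_get_window_label : Prop := ∀ (start_sec : Int) (end_sec : Int) (seizure_intervals : List (Int × Int)), Dom_get_window_label start_sec end_sec seizure_intervals → Spec_get_window_label start_sec end_sec seizure_intervals (get_window_label start_sec end_sec seizure_intervals)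

-- ===== LEMMAS AND PROOFS =====
-- invariant of B's fused loop in terms of A's two loops
theorem bLoop_eq (start_sec end_sec : Int) (found : Bool) (l : List (Int × Int)) :
    bLoop start_sec end_sec found l =
      if aSeizureLoop start_sec end_sec l then "seizure"
      else if found || aPreictalLoop start_sec end_sec l then "preictal"
      else "normal" := by
  induction l generalizing found with
  | nil => simp [bLoop, aSeizureLoop, aPreictalLoop]
  | cons h t ih =>
    obtain ⟨ss, se⟩ := h
    simp only [bLoop, aSeizureLoop, aPreictalLoop]
    by_cases hs : (start_sec < se && end_sec > ss) = true
    · simp [hs]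
    · simp only [hs, if_neg, Bool.not_eq_true] at *
      rw [ih]
      simp [Bool.or_comm, Bool.or_left_comm]

-- ===== VERDICT (by name: the statement is the Claim_ definition above) =====
theorem get_window_label_spec : Claim_equal_get_window_label := by
  intro s e ivs _
  unfold Spec_get_window_label get_window_label get_window_label_alt
  rw [bLoop_eq]
  simp
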